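-- pv_equiv track=rewrite | github.com/pranay-98/AI-uninformed_search_strategies | arrange_pichus.py | solve
-- ===== SOURCE A (Python) =====
-- def count_pichus(house_map):
--     return sum([ row.count('p') for row in house_map ] )
--
-- def add_pichu(house_map, row, col):
--     return house_map[0:row] + [house_map[row][0:col] + ['p',] + house_map[row][col+1:]] + house_map[row+1:]
--
-- def successors(house_map):
--     # validating along with '.', whether the location is valid or not
--     return [ add_pichu(house_map, r, c) for r in range(0, len(house_map)) for c in range(0,len(house_map[0])) if house_map[r][c] == '.' and is_valid_index(house_map, r, c) ]
--
-- def is_goal(house_map, k):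
--     return count_pichus(house_map) == k
--
-- def is_valid_index(house_map, row, column):
--     return is_valid_leftD(house_map, row, column) and is_valid_rightD(house_map, row, column) and is_valid_row (house_map, row, column) and is_valid_column (house_map, row, column)
--
-- def is_valid_leftD(house_map, row, column):
--
--     for i,j in zip(range(row-1,-1,-1),range(column-1,-1,-1)):
--         if house_map[i][j] in "X@":
--             break
--         if house_map[i][j] in "p":
--             return False
--
--     for i,j in zip(range(row+1,len(house_map)),range(column-1,-1,-1)):
--         if house_map[i][j] in "X@":
--             return True
--
--         if house_map[i][j] in "p":
--             return False
--
--     return True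
--
-- def is_valid_rightD(house_map, row, column):
--
--     for i, j in zip(range(row-1,-1,-1),range(column+1,len(house_map[0]))):
--         if house_map[i][j] in "X@":
--             break
--         if house_map[i][j] in "p":
--             return False
--
--     for i,j in zip(range(row+1,len(house_map)),range(column+1,len(house_map[0]))):
--         if house_map[i][j] in "X@":
--             return True
--
--         if house_map[i][j] in "p":
--             return False
--
--     return True
--
-- def is_valid_column (house_map, row, column):
--
--     for i in range(row+1,len(house_map)):
--         if house_map[i][column] in "X@":
--             break
--         if house_map[i][column] in "p":
--             return False
--
--
--     for i in range(row-1,-1,-1):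
--         if house_map[i][column] in "X@":
--             return True
--         if house_map[i][column] in "p":
--             return False
--
--     return True
--
-- def is_valid_row (house_map, row, column):
--
--     for i in range(column+1,len(house_map[0])):
--         if house_map[row][i] in "X@":
--             break
--         if house_map[row][i] in "p":
--             return False
--
--     for i in range(column-1,-1,-1):
--         if house_map[row][i] in "X@":
--             return True
--         if house_map[row][i] in "p":
--             return False
--
--     return True
--
-- def solve(initial_house_map,k):
--     fringe = [initial_house_map]
--     while len(fringe) > 0:
--         for new_house_map in successors( fringe.pop() ):
--             if is_goal(new_house_map,k):
--                 return(new_house_map,True)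
--             fringe.append(new_house_map)
--
--     # returns false if there is no possible locations to place pichus
--     return ([],False)
-- ===== SOURCE B (Python) =====
-- # Alternative decomposition: one generic 8-direction ray scan ("the first marker cell
-- # seen along a ray must not be a pichu") replaces A's four two-half validity helpers,
-- # placement is done by position via enumerate, and the explicit LIFO fringe loop becomes
-- # a recursive depth-first search threading the pichu count.  Same cost, same results.
--
-- _DIRS = ((-1, -1), (1, -1), (-1, 1), (1, 1), (0, 1), (0, -1), (1, 0), (-1, 0))
--
-- def _ray_ok(g, R, C, r, c, dr, dc):
--     # walk from (r, c); the first cell that is a substring of "X@" blocks the ray (OK),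
--     # a first substring-of-"p" cell forbids placing at (r, c)
--     i, j = r + dr, c + dc
--     while 0 <= i < R and 0 <= j < C:
--         ch = g[i][j]
--         if ch in "X@":
--             return True
--         if ch in "p":
--             return False
--         i += dr
--         j += dc
--     return True
--
-- def _placeable(g, R, C, r, c):
--     return g[r][c] == '.' and all(_ray_ok(g, R, C, r, c, dr, dc) for dr, dc in _DIRS)
--
-- def _place(g, r, c):
--     return [row[:c] + ['p'] + row[c + 1:] if i == r else row for i, row in enumerate(g)]
--
-- def _dfs(g, R, C, n, k):
--     cand = [(r, c) for r in range(R) for c in range(C) if _placeable(g, R, C, r, c)]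
--     if n + 1 == k and cand:
--         return _place(g, cand[0][0], cand[0][1])
--     for r, c in reversed(cand):
--         res = _dfs(_place(g, r, c), R, C, n + 1, k)
--         if res is not None:
--             return res
--     return None
--
-- def solve(initial_house_map, k):
--     R = len(initial_house_map)
--     C = len(initial_house_map[0]) if initial_house_map else 0
--     n = sum(row.count('p') for row in initial_house_map)
--     found = _dfs(initial_house_map, R, C, n, k)
--     return ([], False) if found is None else (found, True)
-- ===== Notes on version B (the rewrite author's own statement) =====
-- stated objective: alternative
-- what changed: A's four two-half validity helpers collapse into one generic 8-direction ray scan (first marker cell along a ray must not be a pichu), placement is rebuilt per position via enumerate instead of triple slicing of the whole map, the pichu count is threaded through the search instead of being recounted per goal test, and the explicit LIFO fringe loop becomes a recursive depth-first search.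
import Mathlib
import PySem

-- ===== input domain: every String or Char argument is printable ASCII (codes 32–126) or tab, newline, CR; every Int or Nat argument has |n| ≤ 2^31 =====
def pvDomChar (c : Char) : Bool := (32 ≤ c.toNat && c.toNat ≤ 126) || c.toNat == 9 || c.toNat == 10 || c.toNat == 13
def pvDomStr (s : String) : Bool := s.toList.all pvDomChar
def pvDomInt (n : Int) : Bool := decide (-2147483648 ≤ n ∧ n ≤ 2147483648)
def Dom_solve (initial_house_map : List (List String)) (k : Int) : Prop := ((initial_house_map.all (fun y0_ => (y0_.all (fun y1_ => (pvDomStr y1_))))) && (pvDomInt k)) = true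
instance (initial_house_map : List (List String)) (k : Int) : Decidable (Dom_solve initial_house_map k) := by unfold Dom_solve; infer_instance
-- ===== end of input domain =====

-- B replaces A's four two-half validity helpers by one generic 8-direction ray scan,
-- rebuilds the placed map per position via enumerate instead of triple slicing, threads
-- the pichu count through the search, and turns the explicit LIFO fringe loop into a
-- recursive depth-first search; same results, similar cost (objective: alternative).

-- ===== PORT A =====

def count_pichus (house_map : List (List String)) : Int :=
  (house_map.map (fun row => (PySem.List.count row "p" : Int))).sum

-- house_map[i][j]; exact under Pre_solve (every index the Python forms is then in range)
def cellAt (house_map : List (List String)) (i j : Int) : String :=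
  PySem.List.pyGetD (PySem.List.pyGetD house_map i []) j ""

def add_pichu (house_map : List (List String)) (row col : Int) : List (List String) :=
  PySem.List.slice house_map (some 0) (some row)
    ++ [PySem.List.slice (PySem.List.pyGetD house_map row []) (some 0) (some col)
        ++ ["p"]
        ++ PySem.List.slice (PySem.List.pyGetD house_map row []) (some (col + 1)) none]
    ++ PySem.List.slice house_map (some (row + 1)) none

-- the common body of each of the eight scanning loops in is_valid_*:
-- a blocker ("X@" substring test) stops the scan with True (break / return True),
-- a pichu returns False, falling off the end gives True
def scanHalf (house_map : List (List String)) : List (Int × Int) → Bool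
  | [] => true
  | (i, j) :: rest =>
    if PySem.Str.isIn (cellAt house_map i j) "X@" then true
    else if PySem.Str.isIn (cellAt house_map i j) "p" then false
    else scanHalf house_map rest

def is_valid_leftD (house_map : List (List String)) (row column : Int) : Bool :=
  scanHalf house_map ((PySem.List.pyRange (row - 1) (-1) (-1)).zip (PySem.List.pyRange (column - 1) (-1) (-1)))
  && scanHalf house_map ((PySem.List.pyRange (row + 1) (house_map.length : Int) 1).zip (PySem.List.pyRange (column - 1) (-1) (-1)))

def is_valid_rightD (house_map : List (List String)) (row column : Int) : Bool :=
  scanHalf house_map ((PySem.List.pyRange (row - 1) (-1) (-1)).zip (PySem.List.pyRange (column + 1) ((PySem.List.pyGetD house_map 0 []).length : Int) 1))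
  && scanHalf house_map ((PySem.List.pyRange (row + 1) (house_map.length : Int) 1).zip (PySem.List.pyRange (column + 1) ((PySem.List.pyGetD house_map 0 []).length : Int) 1))

def is_valid_column (house_map : List (List String)) (row column : Int) : Bool :=
  scanHalf house_map ((PySem.List.pyRange (row + 1) (house_map.length : Int) 1).map (fun i => (i, column)))
  && scanHalf house_map ((PySem.List.pyRange (row - 1) (-1) (-1)).map (fun i => (i, column)))

def is_valid_row (house_map : List (List String)) (row column : Int) : Bool :=
  scanHalf house_map ((PySem.List.pyRange (column + 1) ((PySem.List.pyGetD house_map 0 []).length : Int) 1).map (fun i => (row, i)))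
  && scanHalf house_map ((PySem.List.pyRange (column - 1) (-1) (-1)).map (fun i => (row, i)))

def is_valid_index (house_map : List (List String)) (row column : Int) : Bool :=
  is_valid_leftD house_map row column && is_valid_rightD house_map row column
    && is_valid_row house_map row column && is_valid_column house_map row column

def is_goal (house_map : List (List String)) (k : Int) : Bool :=
  count_pichus house_map == k

def successors (house_map : List (List String)) : List (List (List String)) :=
  (PySem.List.pyRange 0 (house_map.length : Int) 1).flatMap (fun r =>
    ((PySem.List.pyRange 0 ((PySem.List.pyGetD house_map 0 []).length : Int) 1).filter
        (fun c => cellAt house_map r c == "." && is_valid_index house_map r c)).map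
      (fun c => add_pichu house_map r c))

-- termination measure machinery (cited by the ports' decreasing_by)
def pichuDots (m : List (List String)) : Nat := (m.map (fun row => row.count ".")).sum
def mapBase (m : List (List String)) : Nat := m.length * (m.head?.getD []).length + 2
def mapWeight (m : List (List String)) : Nat := mapBase m ^ (pichuDots m + 1)
def fringeWeight (l : List (List (List String))) : Nat := (l.map mapWeight).sum

-- the inner for-loop of A's solve: goal-check each successor in order, pushing
-- the non-goal ones onto the fringe; an early goal returns (map, True) at once
def pushLoop (k : Int) (fringe : List (List (List String))) :
    List (List (List String)) → ((List (List String) × Bool) ⊕ List (List (List String)))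
  | [] => .inr fringe
  | s :: rest =>
    if is_goal s k then .inl (s, true) else pushLoop k (fringe ++ [s]) rest

-- A's while loop over the fringe list (fringe.pop() pops the last element); the Nat
-- fuel only makes the loop total -- solve passes fringeWeight, which the proofs show
-- strictly decreases per iteration, so the fuel never runs out on the loop's own path
def solveLoop : Nat -> Int -> List (List (List String)) -> List (List String) × Bool
  | 0, _, _ => ([], false)
  | Nat.succ fuel, k, fringe =>
    match PySem.List.pop? fringe with
    | none => ([], false)
    | some (top, rest) =>
      match pushLoop k rest (successors top) with
      | .inl res => res
      | .inr fr' => solveLoop fuel k fr'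

def solve (initial_house_map : List (List String)) (k : Int) : List (List String) × Bool :=
  solveLoop (fringeWeight [initial_house_map]) k [initial_house_map]

-- ===== PORT B =====
-- Source B: one generic ray walk replaces the four two-half validity helpers

-- the ray walk of Source B's _ray_ok; the Nat fuel only makes the while-loop total --
-- every call passes enough fuel for a unit-direction walk to leave the grid
def pvRayOk : Nat -> List (List String) -> Int -> Int -> Int -> Int -> Int -> Int -> Bool
  | 0, _, _, _, _, _, _, _ => true
  | Nat.succ fuel, g, R, C, i, j, dr, dc =>
    if 0 <= i ∧ i < R ∧ 0 <= j ∧ j < C then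
      if PySem.Str.isIn (PySem.List.pyGetD (PySem.List.pyGetD g i []) j "") "X@" then true
      else if PySem.Str.isIn (PySem.List.pyGetD (PySem.List.pyGetD g i []) j "") "p" then false
      else pvRayOk fuel g R C (i + dr) (j + dc) dr dc
    else true

def pvDirs : List (Int × Int) :=
  [(-1, -1), (1, -1), (-1, 1), (1, 1), (0, 1), (0, -1), (1, 0), (-1, 0)]

def pvPlaceable (g : List (List String)) (R C r c : Int) : Bool :=
  PySem.List.pyGetD (PySem.List.pyGetD g r []) c "" == "."
    && pvDirs.all (fun d => pvRayOk ((R + C).toNat + 2) g R C (r + d.1) (c + d.2) d.1 d.2)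

def pvPlace (g : List (List String)) (r c : Int) : List (List String) :=
  (PySem.List.enumerate g).map (fun p =>
    if p.1 == r then
      PySem.List.slice p.2 none (some c) ++ ["p"] ++ PySem.List.slice p.2 (some (c + 1)) none
    else p.2)

def pvCands (g : List (List String)) (R C : Int) : List (Int × Int) :=
  (PySem.List.pyRange 0 R 1).flatMap (fun r =>
    ((PySem.List.pyRange 0 C 1).filter (fun c => pvPlaceable g R C r c)).map (fun c => (r, c)))

lemma pvLexl {a b x y : Nat} (h : a < b) :
    Prod.Lex (· < ·) (· < ·) (a, x) (b, y) := Prod.lex_iff.mpr (Or.inl h)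

lemma pvLexr {a x y : Nat} (h : x < y) :
    Prod.Lex (· < ·) (· < ·) (a, x) (a, y) := Prod.lex_iff.mpr (Or.inr ⟨rfl, h⟩)

mutual
-- Source B's _dfs: goal-check at count n+1 picks the first candidate, else recurse last-first;
-- the Nat fuel only makes the recursion total -- solve_alt passes 2*pichuDots+1, which the
-- proofs show suffices (each placement removes a dot)
def pvDfs (fuel : Nat) (g : List (List String)) (R C n k : Int) : Option (List (List String)) :=
  match fuel with
  | 0 => none
  | Nat.succ fuel' =>
    let cand := pvCands g R C
    match (if n + 1 == k then cand.head? else none) with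
    | some p => some (pvPlace g p.1 p.2)
    | none => pvTry fuel' g R C cand.reverse n k
termination_by (fuel, 0)
decreasing_by
  exact pvLexl (Nat.lt_succ_self _)

-- Source B's for-loop over reversed(cand)
def pvTry (fuel : Nat) (g : List (List String)) (R C : Int) (l : List (Int × Int)) (n k : Int) :
    Option (List (List String)) :=
  match l with
  | [] => none
  | p :: rest =>
    match pvDfs fuel (pvPlace g p.1 p.2) R C (n + 1) k with
    | some res => some res
    | none => pvTry fuel g R C rest n k
termination_by (fuel, l.length + 1)
decreasing_by
  · exact pvLexr (Nat.zero_lt_succ _)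
  · exact pvLexr (Nat.lt_succ_self _)
end

def solve_alt (initial_house_map : List (List String)) (k : Int) : List (List String) × Bool :=
  let R : Int := initial_house_map.length
  let C : Int :=
    match initial_house_map with
    | [] => 0
    | row0 :: _ => row0.length
  let n : Int := (initial_house_map.map (fun row => (PySem.List.count row "p" : Int))).sum
  match pvDfs (2 * pichuDots initial_house_map + 1) initial_house_map R C n k with
  | none => ([], false)
  | some found => (found, true)

-- ===== PRECONDITION & SPEC =====
-- Pre_solve excludes exactly the inputs on which the Python A raises IndexError: a map whose
-- first row is nonempty while some later row is shorter than it (the successor comprehension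
-- indexes every column of row 0 in every row).
def Pre_solve (initial_house_map : List (List String)) (k : Int) : Prop :=
  ∀ row ∈ initial_house_map, (initial_house_map.head?.getD []).length ≤ row.length
instance (initial_house_map : List (List String)) (k : Int) : Decidable (Pre_solve initial_house_map k) := by
  unfold Pre_solve; infer_instance

def pvWitness_solve : List (List String) × Int := ([[".", "X"], [".", "p"]], 1)

def Spec_solve (initial_house_map : List (List String)) (k : Int) (out : List (List String) × Bool) : Prop := out = solve_alt initial_house_map k
instance (initial_house_map : List (List String)) (k : Int) (out : List (List String) × Bool) : Decidable (Spec_solve initial_house_map k out) := by unfold Spec_solve; infer_instance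

-- ===== CLAIM (what is proved, stated in full; the proofs are below) =====
def Claim_equal_solve : Prop := ∀ (initial_house_map : List (List String)) (k : Int), Dom_solve initial_house_map k → Pre_solve initial_house_map k → Spec_solve initial_house_map k (solve initial_house_map k)

-- ===== LEMMAS AND PROOFS =====

lemma successors_struct {m s : List (List String)} (h : s ∈ successors m) :
    ∃ (rn cn : Nat) (h1 : rn < m.length) (_ : cn < m[rn].length),
      m[rn][cn] = "." ∧ cn < (m.head?.getD []).length ∧
      s = m.take rn ++ [m[rn].take cn ++ ["p"] ++ m[rn].drop (cn + 1)] ++ m.drop (rn + 1) := by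
  rw [successors] at h
  obtain ⟨r, hr, hs⟩ := List.mem_flatMap.mp h
  obtain ⟨c, hc, rfl⟩ := List.mem_map.mp hs
  obtain ⟨hcr, hguard⟩ := List.mem_filter.mp hc
  obtain ⟨hr0, hrlt⟩ := PySem.List.mem_pyRange_one.mp hr
  obtain ⟨hc0, hclt⟩ := PySem.List.mem_pyRange_one.mp hcr
  rw [Bool.and_eq_true, beq_iff_eq] at hguard
  have hcell := hguard.1
  have h1 : r.toNat < m.length := by omega
  have hrowget : PySem.List.pyGetD m r [] = m[r.toNat] :=
    PySem.List.pyGetD_eq_getElem m [] hr0 hrlt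
  rw [cellAt, hrowget] at hcell
  have h2 : c.toNat < m[r.toNat].length := by
    by_contra hcon
    have hnone : PySem.List.pyGet? m[r.toNat] c = none := by
      rw [PySem.List.pyGet?_eq_none_iff]
      simp only [PySem.Raise.InRange]
      omega
    rw [PySem.List.pyGetD_of_none _ _ _ hnone] at hcell
    exact absurd hcell (by decide)
  have hcell' : m[r.toNat][c.toNat] = "." := by
    rw [PySem.List.pyGetD_eq_getElem m[r.toNat] "" hc0 (by omega)] at hcell
    exact hcell
  have hhead : (PySem.List.pyGetD m 0 []).length = (m.head?.getD []).length := by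
    cases m with
    | nil => rfl
    | cons a t => rw [PySem.List.pyGetD_zero_cons]; rfl
  refine ⟨r.toNat, c.toNat, h1, h2, hcell', by omega, ?_⟩
  rw [add_pichu, hrowget]
  rw [PySem.List.slice_zero_start, PySem.List.slice_zero_start,
      PySem.List.slice_to _ hr0, PySem.List.slice_to _ hc0,
      PySem.List.slice_from _ (by omega : (0:Int) ≤ c + 1),
      PySem.List.slice_from _ (by omega : (0:Int) ≤ r + 1)]
  have e1 : (c + 1).toNat = c.toNat + 1 := by omega
  have e2 : (r + 1).toNat = r.toNat + 1 := by omega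
  rw [e1, e2]

lemma succ_base {m s : List (List String)} (h : s ∈ successors m) : mapBase s = mapBase m := by
  obtain ⟨rn, cn, h1, h2, hdot, hC, rfl⟩ := successors_struct h
  have hlen : (m.take rn ++ [m[rn].take cn ++ ["p"] ++ m[rn].drop (cn + 1)] ++ m.drop (rn + 1)).length = m.length := by
    simp [List.length_take, List.length_drop]
    omega
  have hhead : ((m.take rn ++ [m[rn].take cn ++ ["p"] ++ m[rn].drop (cn + 1)] ++ m.drop (rn + 1)).head?.getD []).length
      = (m.head?.getD []).length := by
    rcases Nat.eq_zero_or_pos rn with h0 | hpos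
    · subst h0
      cases m with
      | nil => simp at h1
      | cons a t =>
        simp only [List.getElem_cons_zero] at h2
        simp [List.length_take]
        omega
    · cases m with
      | nil => simp at h1
      | cons a t =>
        rcases rn with _ | rn'
        · omega
        · simp [List.take_succ_cons]
  rw [mapBase, mapBase, hlen, hhead]

lemma succ_dots {m s : List (List String)} (h : s ∈ successors m) :
    pichuDots s + 1 = pichuDots m := by
  obtain ⟨rn, cn, h1, h2, hdot, hC, rfl⟩ := successors_struct h
  have hm : m = m.take rn ++ m[rn] :: m.drop (rn + 1) := by
    rw [List.getElem_cons_drop]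
    exact (List.take_append_drop rn m).symm
  have hrow : m[rn] = m[rn].take cn ++ m[rn][cn] :: m[rn].drop (cn + 1) := by
    rw [List.getElem_cons_drop]
    exact (List.take_append_drop cn m[rn]).symm
  conv_rhs => rw [hm]
  simp only [pichuDots, List.map_append, List.map_cons, List.sum_append, List.sum_cons]
  conv_rhs => rw [hrow]
  rw [hdot]
  simp [List.count_append]
  omega

lemma succ_length_le (m : List (List String)) :
    (successors m).length ≤ m.length * (m.head?.getD []).length := by
  have hhead : (PySem.List.pyGetD m 0 []).length = (m.head?.getD []).length := by
    cases m with
    | nil => rfl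
    | cons a t => rw [PySem.List.pyGetD_zero_cons]; rfl
  rw [successors, List.length_flatMap]
  have hall : ∀ x ∈ (PySem.List.pyRange 0 (m.length : Int) 1).map
      (fun r => (((PySem.List.pyRange 0 ((PySem.List.pyGetD m 0 []).length : Int) 1).filter
        (fun c => cellAt m r c == "." && is_valid_index m r c)).map
        (fun c => add_pichu m r c)).length),
      x ≤ (m.head?.getD []).length := by
    intro x hx
    obtain ⟨r, _, rfl⟩ := List.mem_map.mp hx
    calc _ ≤ (PySem.List.pyRange 0 ((PySem.List.pyGetD m 0 []).length : Int) 1).length := by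
              rw [List.length_map]; exact List.length_filter_le _ _
      _ = (m.head?.getD []).length := by
              rw [PySem.List.length_pyRange_one, ← hhead]; omega
  have := List.sum_le_card_nsmul _ _ hall
  rw [List.length_map, PySem.List.length_pyRange_one, smul_eq_mul] at this
  calc _ ≤ _ := this
    _ ≤ m.length * (m.head?.getD []).length := by
          have : ((m.length : Int) - 0).toNat = m.length := by omega
          rw [this]

lemma fringeWeight_append (a b : List (List (List String))) :
    fringeWeight (a ++ b) = fringeWeight a + fringeWeight b := by
  simp [fringeWeight]

lemma succ_weight_lt (m : List (List String)) :
    fringeWeight (successors m) < mapWeight m := by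
  have hall : ∀ x ∈ (successors m).map mapWeight, x ≤ mapBase m ^ pichuDots m := by
    intro x hx
    obtain ⟨s, hs, rfl⟩ := List.mem_map.mp hx
    rw [mapWeight, succ_base hs, succ_dots hs]
  have h1 := List.sum_le_card_nsmul _ _ hall
  rw [List.length_map, smul_eq_mul] at h1
  have hV : 0 < mapBase m ^ pichuDots m := Nat.pow_pos (by rw [mapBase]; omega)
  calc fringeWeight (successors m) ≤ (successors m).length * (mapBase m ^ pichuDots m) := h1
    _ ≤ (m.length * (m.head?.getD []).length) * (mapBase m ^ pichuDots m) :=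
        Nat.mul_le_mul_right _ (succ_length_le m)
    _ < mapBase m * (mapBase m ^ pichuDots m) := by
        exact (Nat.mul_lt_mul_right hV).mpr (by rw [mapBase]; omega)
    _ = mapWeight m := by rw [mapWeight, pow_succ]; ring

lemma pushLoop_inr {k : Int} {fringe fr' : List (List (List String))}
    {l : List (List (List String))} (h : pushLoop k fringe l = .inr fr') :
    fr' = fringe ++ l := by
  induction l generalizing fringe with
  | nil => simp [pushLoop] at h; simp [h.symm]
  | cons s rest ih =>
    rw [pushLoop] at h
    split at h
    · cases h
    · rw [ih h]; simp

lemma succ_dots_lt {m s : List (List String)} (h : s ∈ successors m) :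
    pichuDots s < pichuDots m := by
  have := succ_dots h; omega

-- ---- stage 1: A's explicit LIFO fringe loop equals a recursive DFS over successor maps ----

-- first successor (left-to-right) that is a goal
def firstGoal (k : Int) : List (List (List String)) → Option (List (List String))
  | [] => none
  | s :: rest => if is_goal s k then some s else firstGoal k rest

def succBound (l : List (List (List String))) : Nat :=
  (l.map (fun s => 2 * pichuDots s + 2)).foldr max 0

lemma succBound_le {l : List (List (List String))} {B : Nat}
    (h : ∀ s ∈ l, 2 * pichuDots s + 2 ≤ B) : succBound l ≤ B := by
  induction l with
  | nil => exact Nat.zero_le _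
  | cons s rest ih =>
    simp only [succBound, List.map_cons, List.foldr_cons]
    exact Nat.max_le.mpr ⟨h s (by simp), ih (fun x hx => h x (by simp [hx]))⟩

lemma le_succBound_head (s : List (List String)) (rest : List (List (List String))) :
    2 * pichuDots s + 2 ≤ succBound (s :: rest) := by
  simp only [succBound, List.map_cons, List.foldr_cons]
  exact Nat.le_max_left _ _

lemma succBound_tail_le (s : List (List String)) (rest : List (List (List String))) :
    succBound rest ≤ succBound (s :: rest) := by
  simp only [succBound, List.map_cons, List.foldr_cons]
  exact Nat.le_max_right _ _

lemma dfsA_dec (m : List (List String)) :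
    succBound (successors m).reverse < 2 * pichuDots m + 1 := by
  have hb : succBound (successors m).reverse ≤ 2 * pichuDots m := by
    apply succBound_le
    intro s hs
    have := succ_dots_lt (List.mem_reverse.mp hs)
    omega
  omega

lemma tryA_dec1 (s : List (List String)) (rest : List (List (List String))) :
    2 * pichuDots s + 1 < succBound (s :: rest) := by
  have := le_succBound_head s rest
  omega

lemma tryA_dec2 (s : List (List String)) (rest : List (List (List String))) :
    Prod.Lex (· < ·) (· < ·) (succBound rest, rest.length)
      (succBound (s :: rest), (s :: rest).length) := by
  rcases Nat.lt_or_ge (succBound rest) (succBound (s :: rest)) with hlt | hge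
  · exact Prod.Lex.left _ _ hlt
  · have heq : succBound rest = succBound (s :: rest) :=
      Nat.le_antisymm (succBound_tail_le s rest) hge
    rw [heq]
    exact Prod.Lex.right _ (by simp)

mutual
-- proof-side recursive DFS over successor MAPS (the shape stage 1 extracts from A's loop)
def dfsA (house_map : List (List String)) (k : Int) : Option (List (List String)) :=
  let succs := successors house_map
  match firstGoal k succs with
  | some g => some g
  | none => tryA succs.reverse k
termination_by (2 * pichuDots house_map + 1, 0)
decreasing_by
  exact Prod.Lex.left _ _ (dfsA_dec house_map)

def tryA (l : List (List (List String))) (k : Int) : Option (List (List String)) :=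
  match l with
  | [] => none
  | s :: rest =>
    match dfsA s k with
    | some g => some g
    | none => tryA rest k
termination_by (succBound l, l.length)
decreasing_by
  · exact Prod.Lex.left _ _ (tryA_dec1 s rest)
  · exact tryA_dec2 s rest
end

lemma pushLoop_eq (k : Int) (fringe l : List (List (List String))) :
    pushLoop k fringe l =
      match firstGoal k l with
      | some g => Sum.inl (g, true)
      | none => Sum.inr (fringe ++ l) := by
  induction l generalizing fringe with
  | nil => simp [pushLoop, firstGoal]
  | cons s rest ih =>
    rw [pushLoop, firstGoal]
    split_ifs with hg
    · rfl
    · rw [ih]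
      cases firstGoal k rest <;> simp

lemma tryA_nil (k : Int) : tryA [] k = none := by
  rw [tryA.eq_def]

lemma tryA_cons (s : List (List String)) (rest : List (List (List String))) (k : Int) :
    tryA (s :: rest) k =
      match dfsA s k with
      | some g => some g
      | none => tryA rest k := by
  rw [tryA.eq_def]

lemma tryA_append (a b : List (List (List String))) (k : Int) :
    tryA (a ++ b) k =
      match tryA a k with
      | some g => some g
      | none => tryA b k := by
  induction a with
  | nil => rw [List.nil_append, tryA_nil]
  | cons s rest ih =>
    rw [List.cons_append, tryA_cons, tryA_cons]
    cases dfsA s k <;> simp [ih]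

lemma dfsA_eq (m : List (List String)) (k : Int) :
    dfsA m k =
      match firstGoal k (successors m) with
      | some g => some g
      | none => tryA (successors m).reverse k := by
  rw [dfsA.eq_def]

lemma mapWeight_pos (m : List (List String)) : 0 < mapWeight m :=
  Nat.pow_pos (by rw [mapBase]; omega)

lemma solveLoop_nil_any (F : Nat) (k : Int) : solveLoop F k [] = ([], false) := by
  cases F with
  | zero => rfl
  | succ F => rw [solveLoop]; rfl

-- the fuel never matters as long as it dominates the fringe weight (which strictly
-- decreases per iteration)
lemma solveLoop_fuel (k : Int) (w : Nat) :
    ∀ (F F' : Nat) (fringe : List (List (List String))),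
      fringeWeight fringe ≤ w → fringeWeight fringe ≤ F → fringeWeight fringe ≤ F' →
      solveLoop F k fringe = solveLoop F' k fringe := by
  induction w using Nat.strong_induction_on with
  | _ w IH =>
    intro F F' fringe hw hF hF'
    rcases List.eq_nil_or_concat fringe with rfl | ⟨l', m, rfl⟩
    · rw [solveLoop_nil_any, solveLoop_nil_any]
    · rw [List.concat_eq_append] at *
      have hwm : 0 < mapWeight m := mapWeight_pos m
      have hwt : fringeWeight (l' ++ [m]) = fringeWeight l' + mapWeight m := by
        rw [fringeWeight_append]; simp [fringeWeight]
      cases F with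
      | zero => omega
      | succ F1 =>
        cases F' with
        | zero => omega
        | succ F1' =>
          rw [solveLoop, solveLoop, PySem.List.pop?_last]
          dsimp only
          cases h2 : pushLoop k l' (successors m) with
          | inl res => rfl
          | inr fr' =>
            have hlt : fringeWeight fr' < fringeWeight (l' ++ [m]) := by
              rw [pushLoop_inr h2, fringeWeight_append, hwt]
              have := succ_weight_lt m
              rw [fringeWeight_append] at *
              omega
            exact IH (fringeWeight fr') (by omega) F1 F1' fr' le_rfl (by omega) (by omega)

-- the loop with exactly enough fuel: the canonical run solve performs
def runLoop (k : Int) (fringe : List (List (List String))) : List (List String) × Bool :=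
  solveLoop (fringeWeight fringe) k fringe

lemma runLoop_concat (k : Int) (fringe : List (List (List String))) (m : List (List String)) :
    runLoop k (fringe ++ [m]) =
      match pushLoop k fringe (successors m) with
      | .inl res => res
      | .inr fr' => runLoop k fr' := by
  rw [runLoop]
  have hwm : 0 < mapWeight m := mapWeight_pos m
  have hwt : fringeWeight (fringe ++ [m]) = fringeWeight fringe + mapWeight m := by
    rw [fringeWeight_append]; simp [fringeWeight]
  obtain ⟨F, hF⟩ : ∃ F, fringeWeight (fringe ++ [m]) = F + 1 :=
    ⟨fringeWeight (fringe ++ [m]) - 1, by omega⟩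
  rw [hF, solveLoop, PySem.List.pop?_last]
  dsimp only
  cases h2 : pushLoop k fringe (successors m) with
  | inl res => rfl
  | inr fr' =>
    have hlt : fringeWeight fr' < fringeWeight (fringe ++ [m]) := by
      rw [pushLoop_inr h2, fringeWeight_append, hwt]
      have := succ_weight_lt m
      rw [fringeWeight_append] at *
      omega
    exact solveLoop_fuel k (fringeWeight fr') F (fringeWeight fr') fr' le_rfl (by omega) le_rfl

lemma runLoop_eq_tryA (k : Int) (n : Nat) :
    ∀ (ss fringe : List (List (List String))), fringeWeight ss ≤ n →
      runLoop k (fringe ++ ss) =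
        (match tryA ss.reverse k with
         | some g => (g, true)
         | none => runLoop k fringe) := by
  induction n using Nat.strong_induction_on with
  | _ n IH =>
    intro ss fringe hle
    rcases List.eq_nil_or_concat ss with rfl | ⟨ss', m, rfl⟩
    · simp [tryA_nil]
    · rw [List.concat_eq_append] at *
      have hassoc : fringe ++ (ss' ++ [m]) = (fringe ++ ss') ++ [m] :=
        (List.append_assoc fringe ss' [m]).symm
      rw [hassoc, runLoop_concat, pushLoop_eq]
      have hrev : (ss' ++ [m]).reverse = m :: ss'.reverse := by simp
      rw [hrev, tryA_cons, dfsA_eq]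
      cases hfg : firstGoal k (successors m) with
      | some g => rfl
      | none =>
        have hw1 : fringeWeight (ss' ++ successors m) < fringeWeight (ss' ++ [m]) := by
          rw [fringeWeight_append, fringeWeight_append]
          have := succ_weight_lt m
          simp only [fringeWeight, List.map_cons, List.map_nil, List.sum_cons, List.sum_nil] at *
          omega
        have hIH := IH (fringeWeight (ss' ++ successors m)) (lt_of_lt_of_le hw1 hle)
          (ss' ++ successors m) fringe le_rfl
        change runLoop k (fringe ++ ss' ++ successors m) = _
        rw [List.append_assoc, hIH, List.reverse_append, tryA_append]

lemma runLoop_nil (k : Int) : runLoop k [] = ([], false) := by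
  rw [runLoop, solveLoop_nil_any]

lemma solve_eq_dfsA (m : List (List String)) (k : Int) :
    solve m k = (match dfsA m k with
                 | some g => (g, true)
                 | none => ([], false)) := by
  have hsolve : solve m k = runLoop k [m] := rfl
  rw [hsolve]
  have h := runLoop_eq_tryA k (fringeWeight [m]) [m] [] le_rfl
  rw [List.nil_append] at h
  rw [h, List.reverse_singleton, tryA_cons]
  cases dfsA m k <;> simp [tryA_nil, runLoop_nil]

-- ---- stage 2: B's ray scans equal A's eight half-scans ----

lemma pyGetD_zero_head (m : List (List String)) : PySem.List.pyGetD m 0 [] = m.head?.getD [] := by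
  cases m with
  | nil => rfl
  | cons a t => rw [PySem.List.pyGetD_zero_cons]; rfl

lemma pvRayOk_stop {g : List (List String)} {R C i j dr dc : Int} (F : Nat)
    (h : ¬(0 ≤ i ∧ i < R ∧ 0 ≤ j ∧ j < C)) : pvRayOk F g R C i j dr dc = true := by
  cases F with
  | zero => rfl
  | succ F => rw [pvRayOk, if_neg h]

lemma pvRayOk_step {g : List (List String)} {R C i j dr dc : Int} (F : Nat)
    (h : 0 ≤ i ∧ i < R ∧ 0 ≤ j ∧ j < C) :
    pvRayOk (F + 1) g R C i j dr dc =
      (if PySem.Str.isIn (cellAt g i j) "X@" then true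
       else if PySem.Str.isIn (cellAt g i j) "p" then false
       else pvRayOk F g R C (i + dr) (j + dc) dr dc) := by
  rw [pvRayOk, if_pos h]
  rfl

lemma ray_upleft (m : List (List String)) (N : Nat) :
    ∀ (i j : Int), (i + 1).toNat ≤ N → i < (m.length : Int) → j < ((m.head?.getD []).length : Int) →
      scanHalf m ((PySem.List.pyRange i (-1) (-1)).zip (PySem.List.pyRange j (-1) (-1))) =
      pvRayOk N m (m.length : Int) ((m.head?.getD []).length : Int) i j (-1) (-1) := by
  induction N with
  | zero =>
    intro i j hN hi hj
    rw [PySem.List.pyRange_neg_one_eq_nil (by omega), List.zip_nil_left, pvRayOk_stop _ (by omega)]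
    rfl
  | succ N ih =>
    intro i j hN hi hj
    by_cases hi0 : i < 0
    · rw [PySem.List.pyRange_neg_one_eq_nil (by omega), List.zip_nil_left, pvRayOk_stop _ (by omega)]
      rfl
    by_cases hj0 : j < 0
    · rw [PySem.List.pyRange_neg_one_eq_nil (show j ≤ -1 by omega), List.zip_nil_right,
          pvRayOk_stop _ (by omega)]
      rfl
    · rw [PySem.List.pyRange_neg_one_cons (show (-1:Int) < i by omega),
          PySem.List.pyRange_neg_one_cons (show (-1:Int) < j by omega), List.zip_cons_cons,
          scanHalf, pvRayOk_step N (by omega)]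
      have e1 : i + -1 = i - 1 := by ring
      have e2 : j + -1 = j - 1 := by ring
      rw [e1, e2]
      split_ifs <;> first | rfl | exact ih (i - 1) (j - 1) (by omega) (by omega) (by omega)

lemma ray_downleft (m : List (List String)) (N : Nat) :
    ∀ (i j : Int), (j + 1).toNat ≤ N → 0 ≤ i → j < ((m.head?.getD []).length : Int) →
      scanHalf m ((PySem.List.pyRange i (m.length : Int) 1).zip (PySem.List.pyRange j (-1) (-1))) =
      pvRayOk N m (m.length : Int) ((m.head?.getD []).length : Int) i j 1 (-1) := by
  induction N with
  | zero =>
    intro i j hN hi hj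
    rw [PySem.List.pyRange_neg_one_eq_nil (by omega), List.zip_nil_right, pvRayOk_stop _ (by omega)]
    rfl
  | succ N ih =>
    intro i j hN hi hj
    by_cases hiR : (m.length : Int) ≤ i
    · rw [PySem.List.pyRange_one_eq_nil (by omega), List.zip_nil_left, pvRayOk_stop _ (by omega)]
      rfl
    by_cases hj0 : j < 0
    · rw [PySem.List.pyRange_neg_one_eq_nil (show j ≤ -1 by omega), List.zip_nil_right,
          pvRayOk_stop _ (by omega)]
      rfl
    · rw [PySem.List.pyRange_one_cons (by omega),
          PySem.List.pyRange_neg_one_cons (show (-1:Int) < j by omega), List.zip_cons_cons,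
          scanHalf, pvRayOk_step N (by omega)]
      have e2 : j + -1 = j - 1 := by ring
      rw [e2]
      split_ifs <;> first | rfl | exact ih (i + 1) (j - 1) (by omega) (by omega) (by omega)

lemma ray_upright (m : List (List String)) (N : Nat) :
    ∀ (i j : Int), (i + 1).toNat ≤ N → i < (m.length : Int) → 0 ≤ j →
      scanHalf m ((PySem.List.pyRange i (-1) (-1)).zip (PySem.List.pyRange j ((m.head?.getD []).length : Int) 1)) =
      pvRayOk N m (m.length : Int) ((m.head?.getD []).length : Int) i j (-1) 1 := by
  induction N with
  | zero =>
    intro i j hN hi hj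
    rw [PySem.List.pyRange_neg_one_eq_nil (by omega), List.zip_nil_left, pvRayOk_stop _ (by omega)]
    rfl
  | succ N ih =>
    intro i j hN hi hj
    by_cases hi0 : i < 0
    · rw [PySem.List.pyRange_neg_one_eq_nil (by omega), List.zip_nil_left, pvRayOk_stop _ (by omega)]
      rfl
    by_cases hjC : ((m.head?.getD []).length : Int) ≤ j
    · rw [PySem.List.pyRange_one_eq_nil (by omega), List.zip_nil_right, pvRayOk_stop _ (by omega)]
      rfl
    · rw [PySem.List.pyRange_neg_one_cons (show (-1:Int) < i by omega),
          PySem.List.pyRange_one_cons (by omega), List.zip_cons_cons,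
          scanHalf, pvRayOk_step N (by omega)]
      have e1 : i + -1 = i - 1 := by ring
      rw [e1]
      split_ifs <;> first | rfl | exact ih (i - 1) (j + 1) (by omega) (by omega) (by omega)

lemma ray_downright (m : List (List String)) (N : Nat) :
    ∀ (i j : Int), ((m.length : Int) - i).toNat ≤ N → 0 ≤ i → 0 ≤ j →
      scanHalf m ((PySem.List.pyRange i (m.length : Int) 1).zip (PySem.List.pyRange j ((m.head?.getD []).length : Int) 1)) =
      pvRayOk N m (m.length : Int) ((m.head?.getD []).length : Int) i j 1 1 := by
  induction N with
  | zero =>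
    intro i j hN hi hj
    rw [PySem.List.pyRange_one_eq_nil (by omega), List.zip_nil_left, pvRayOk_stop _ (by omega)]
    rfl
  | succ N ih =>
    intro i j hN hi hj
    by_cases hiR : (m.length : Int) ≤ i
    · rw [PySem.List.pyRange_one_eq_nil (a := i) (by omega), List.zip_nil_left, pvRayOk_stop _ (by omega)]
      rfl
    by_cases hjC : ((m.head?.getD []).length : Int) ≤ j
    · rw [PySem.List.pyRange_one_eq_nil (a := j) (by omega), List.zip_nil_right, pvRayOk_stop _ (by omega)]
      rfl
    · rw [PySem.List.pyRange_one_cons (a := i) (by omega), PySem.List.pyRange_one_cons (a := j) (by omega),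
          List.zip_cons_cons, scanHalf, pvRayOk_step N (by omega)]
      split_ifs <;> first | rfl | exact ih (i + 1) (j + 1) (by omega) (by omega) (by omega)

lemma ray_right (m : List (List String)) (N : Nat) :
    ∀ (row j : Int), (((m.head?.getD []).length : Int) - j).toNat ≤ N →
      0 ≤ row → row < (m.length : Int) → 0 ≤ j →
      scanHalf m ((PySem.List.pyRange j ((m.head?.getD []).length : Int) 1).map (fun i => (row, i))) =
      pvRayOk N m (m.length : Int) ((m.head?.getD []).length : Int) row j 0 1 := by
  induction N with
  | zero =>
    intro row j hN hr0 hrR hj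
    rw [PySem.List.pyRange_one_eq_nil (by omega), List.map_nil, pvRayOk_stop _ (by omega)]
    rfl
  | succ N ih =>
    intro row j hN hr0 hrR hj
    by_cases hjC : ((m.head?.getD []).length : Int) ≤ j
    · rw [PySem.List.pyRange_one_eq_nil (by omega), List.map_nil, pvRayOk_stop _ (by omega)]
      rfl
    · rw [PySem.List.pyRange_one_cons (by omega), List.map_cons,
          scanHalf, pvRayOk_step N (by omega)]
      have e1 : row + 0 = row := by ring
      rw [e1]
      split_ifs <;> first | rfl | exact ih row (j + 1) (by omega) hr0 hrR (by omega)

lemma ray_left (m : List (List String)) (N : Nat) :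
    ∀ (row j : Int), (j + 1).toNat ≤ N →
      0 ≤ row → row < (m.length : Int) → j < ((m.head?.getD []).length : Int) →
      scanHalf m ((PySem.List.pyRange j (-1) (-1)).map (fun i => (row, i))) =
      pvRayOk N m (m.length : Int) ((m.head?.getD []).length : Int) row j 0 (-1) := by
  induction N with
  | zero =>
    intro row j hN hr0 hrR hj
    rw [PySem.List.pyRange_neg_one_eq_nil (by omega), List.map_nil, pvRayOk_stop _ (by omega)]
    rfl
  | succ N ih =>
    intro row j hN hr0 hrR hj
    by_cases hj0 : j < 0
    · rw [PySem.List.pyRange_neg_one_eq_nil (show j ≤ -1 by omega), List.map_nil,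
          pvRayOk_stop _ (by omega)]
      rfl
    · rw [PySem.List.pyRange_neg_one_cons (show (-1:Int) < j by omega), List.map_cons,
          scanHalf, pvRayOk_step N (by omega)]
      have e1 : row + 0 = row := by ring
      have e2 : j + -1 = j - 1 := by ring
      rw [e1, e2]
      split_ifs <;> first | rfl | exact ih row (j - 1) (by omega) hr0 hrR (by omega)

lemma ray_down (m : List (List String)) (N : Nat) :
    ∀ (i col : Int), ((m.length : Int) - i).toNat ≤ N →
      0 ≤ col → col < ((m.head?.getD []).length : Int) → 0 ≤ i →
      scanHalf m ((PySem.List.pyRange i (m.length : Int) 1).map (fun i => (i, col))) =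
      pvRayOk N m (m.length : Int) ((m.head?.getD []).length : Int) i col 1 0 := by
  induction N with
  | zero =>
    intro i col hN hc0 hcC hi
    rw [PySem.List.pyRange_one_eq_nil (by omega), List.map_nil, pvRayOk_stop _ (by omega)]
    rfl
  | succ N ih =>
    intro i col hN hc0 hcC hi
    by_cases hiR : (m.length : Int) ≤ i
    · rw [PySem.List.pyRange_one_eq_nil (by omega), List.map_nil, pvRayOk_stop _ (by omega)]
      rfl
    · rw [PySem.List.pyRange_one_cons (by omega), List.map_cons,
          scanHalf, pvRayOk_step N (by omega)]
      have e1 : col + 0 = col := by ring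
      rw [e1]
      split_ifs <;> first | rfl | exact ih (i + 1) col (by omega) hc0 hcC (by omega)

lemma ray_up (m : List (List String)) (N : Nat) :
    ∀ (i col : Int), (i + 1).toNat ≤ N →
      0 ≤ col → col < ((m.head?.getD []).length : Int) → i < (m.length : Int) →
      scanHalf m ((PySem.List.pyRange i (-1) (-1)).map (fun i => (i, col))) =
      pvRayOk N m (m.length : Int) ((m.head?.getD []).length : Int) i col (-1) 0 := by
  induction N with
  | zero =>
    intro i col hN hc0 hcC hi
    rw [PySem.List.pyRange_neg_one_eq_nil (by omega), List.map_nil, pvRayOk_stop _ (by omega)]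
    rfl
  | succ N ih =>
    intro i col hN hc0 hcC hi
    by_cases hi0 : i < 0
    · rw [PySem.List.pyRange_neg_one_eq_nil (by omega), List.map_nil, pvRayOk_stop _ (by omega)]
      rfl
    · rw [PySem.List.pyRange_neg_one_cons (show (-1:Int) < i by omega), List.map_cons,
          scanHalf, pvRayOk_step N (by omega)]
      have e1 : i + -1 = i - 1 := by ring
      have e2 : col + 0 = col := by ring
      rw [e1, e2]
      split_ifs <;> first | rfl | exact ih (i - 1) col (by omega) hc0 hcC (by omega)

lemma valid_eq (m : List (List String)) (r c : Int)
    (hr0 : 0 ≤ r) (hrR : r < (m.length : Int))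
    (hc0 : 0 ≤ c) (hcC : c < ((m.head?.getD []).length : Int)) :
    is_valid_index m r c =
      pvDirs.all (fun d =>
        pvRayOk (((m.length : Int) + ((m.head?.getD []).length : Int)).toNat + 2)
          m (m.length : Int) ((m.head?.getD []).length : Int) (r + d.1) (c + d.2) d.1 d.2) := by
  have hh : PySem.List.pyGetD m 0 [] = m.head?.getD [] := pyGetD_zero_head m
  rw [is_valid_index, is_valid_leftD, is_valid_rightD, is_valid_row, is_valid_column, hh]
  rw [ray_upleft m (((m.length : Int) + ((m.head?.getD []).length : Int)).toNat + 2)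
        (r - 1) (c - 1) (by omega) (by omega) (by omega),
      ray_downleft m (((m.length : Int) + ((m.head?.getD []).length : Int)).toNat + 2)
        (r + 1) (c - 1) (by omega) (by omega) (by omega),
      ray_upright m (((m.length : Int) + ((m.head?.getD []).length : Int)).toNat + 2)
        (r - 1) (c + 1) (by omega) (by omega) (by omega),
      ray_downright m (((m.length : Int) + ((m.head?.getD []).length : Int)).toNat + 2)
        (r + 1) (c + 1) (by omega) (by omega) (by omega),
      ray_right m (((m.length : Int) + ((m.head?.getD []).length : Int)).toNat + 2)
        r (c + 1) (by omega) hr0 hrR (by omega),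
      ray_left m (((m.length : Int) + ((m.head?.getD []).length : Int)).toNat + 2)
        r (c - 1) (by omega) hr0 hrR (by omega),
      ray_down m (((m.length : Int) + ((m.head?.getD []).length : Int)).toNat + 2)
        (r + 1) c (by omega) hc0 hcC (by omega),
      ray_up m (((m.length : Int) + ((m.head?.getD []).length : Int)).toNat + 2)
        (r - 1) c (by omega) hc0 hcC (by omega)]
  simp only [pvDirs, List.all_cons, List.all_nil, Bool.and_true]
  have e1 : r + (-1 : Int) = r - 1 := by ring
  have e2 : c + (-1 : Int) = c - 1 := by ring
  have e3 : r + (0 : Int) = r := by ring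
  have e4 : c + (0 : Int) = c := by ring
  rw [e1, e2, e3, e4]
  simp only [Bool.and_assoc]

-- ---- stage 3: B's enumerate-based placement equals A's slice-based add_pichu ----

lemma enum_map_if (f : List String → List String) :
    ∀ (m : List (List String)) (s r : Int),
      (PySem.List.enumerate m s).map (fun p => if p.1 == r then f p.2 else p.2) =
        (if h : 0 ≤ r - s ∧ (r - s).toNat < m.length then
          m.take (r - s).toNat ++ [f (m[(r - s).toNat]'h.2)] ++ m.drop ((r - s).toNat + 1)
        else m) := by
  intro m
  induction m with
  | nil =>
    intro s r
    rw [dif_neg (by simp)]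
    rfl
  | cons x t ih =>
    intro s r
    rw [PySem.List.enumerate_cons, List.map_cons]
    by_cases hs : s = r
    · subst hs
      have hhead : ((if (s == s) = true then f x else x)) = f x := by simp
      rw [hhead]
      have htail : (PySem.List.enumerate t (s + 1)).map (fun p => if p.1 == s then f p.2 else p.2) = t := by
        have hcg : ∀ p ∈ PySem.List.enumerate t (s + 1),
            (if p.1 == s then f p.2 else p.2) = p.2 := by
          intro p hp
          obtain ⟨k, hk, rfl⟩ := (PySem.List.mem_enumerate_iff t (s + 1) p).mp hp
          rw [if_neg (by simp only [beq_iff_eq]; omega)]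
        rw [List.map_congr_left hcg, PySem.List.map_snd_enumerate]
      rw [htail, dif_pos (by simp)]
      simp
    · have hhead : ((if (s == r) = true then f x else x)) = x := by
        rw [if_neg (by simp [hs])]
      rw [hhead, ih (s + 1) r]
      by_cases hin : 0 ≤ r - s ∧ (r - s).toNat < t.length + 1
      · have hr1 : 1 ≤ r - s := by
          rcases hin with ⟨h1, _⟩
          omega
        have hin' : 0 ≤ r - (s + 1) ∧ (r - (s + 1)).toNat < t.length := by omega
        rw [dif_pos hin', dif_pos (by simpa using hin)]
        have hn : (r - s).toNat = (r - (s + 1)).toNat + 1 := by omega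
        simp only [hn, List.take_succ_cons, List.drop_succ_cons, List.getElem_cons_succ,
          List.cons_append]
      · rw [dif_neg (by omega), dif_neg (by simpa using hin)]

lemma pvPlace_eq (m : List (List String)) (r c : Int)
    (hr0 : 0 ≤ r) (hrR : r < (m.length : Int)) :
    pvPlace m r c =
      m.take r.toNat
        ++ [PySem.List.slice (m[r.toNat]'(by omega)) none (some c) ++ ["p"]
            ++ PySem.List.slice (m[r.toNat]'(by omega)) (some (c + 1)) none]
        ++ m.drop (r.toNat + 1) := by
  rw [pvPlace, enum_map_if (fun row =>
      PySem.List.slice row none (some c) ++ ["p"] ++ PySem.List.slice row (some (c + 1)) none) m 0 r]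
  rw [dif_pos (by omega)]
  simp only [sub_zero]

lemma add_pichu_eq (m : List (List String)) (r c : Int)
    (hr0 : 0 ≤ r) (hrR : r < (m.length : Int)) :
    add_pichu m r c =
      m.take r.toNat
        ++ [PySem.List.slice (m[r.toNat]'(by omega)) none (some c) ++ ["p"]
            ++ PySem.List.slice (m[r.toNat]'(by omega)) (some (c + 1)) none]
        ++ m.drop (r.toNat + 1) := by
  rw [add_pichu, PySem.List.slice_zero_start, PySem.List.slice_zero_start,
      PySem.List.slice_to _ hr0,
      PySem.List.slice_from _ (by omega : (0:Int) ≤ r + 1),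
      PySem.List.pyGetD_eq_getElem m [] hr0 hrR]
  have e2 : (r + 1).toNat = r.toNat + 1 := by omega
  rw [e2]

lemma place_eq_add (m : List (List String)) (r c : Int)
    (hr0 : 0 ≤ r) (hrR : r < (m.length : Int)) :
    pvPlace m r c = add_pichu m r c := by
  rw [pvPlace_eq m r c hr0 hrR, add_pichu_eq m r c hr0 hrR]

-- under the Pre_solve row-length invariant, B's candidate/placement view generates
-- exactly A's successor list
lemma successors_eq (m : List (List String)) :
    successors m =
      (pvCands m (m.length : Int) ((m.head?.getD []).length : Int)).map
        (fun p => pvPlace m p.1 p.2) := by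
  rw [successors, pvCands, pyGetD_zero_head, List.map_flatMap]
  apply List.flatMap_congr
  intro r hr
  obtain ⟨hr0, hrR⟩ := PySem.List.mem_pyRange_one.mp hr
  rw [List.map_map]
  have hfilter :
      (PySem.List.pyRange 0 ((m.head?.getD []).length : Int) 1).filter
          (fun c => cellAt m r c == "." && is_valid_index m r c) =
        (PySem.List.pyRange 0 ((m.head?.getD []).length : Int) 1).filter
          (fun c => pvPlaceable m (m.length : Int) ((m.head?.getD []).length : Int) r c) := by
    apply List.filter_congr
    intro c hc
    obtain ⟨hc0, hcC⟩ := PySem.List.mem_pyRange_one.mp hc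
    rw [pvPlaceable, cellAt, valid_eq m r c hr0 hrR hc0 hcC]
  rw [hfilter]
  apply List.map_congr_left
  intro c hc
  obtain ⟨hc0, _⟩ := PySem.List.mem_pyRange_one.mp (List.mem_filter.mp hc).1
  exact (place_eq_add m r c hr0 hrR).symm

-- ---- stage 4: the count/shape invariant and the main bridge ----

lemma succ_count {m s : List (List String)} (h : s ∈ successors m) :
    count_pichus s = count_pichus m + 1 := by
  obtain ⟨rn, cn, h1, h2, hdot, hC, rfl⟩ := successors_struct h
  have hm : m = m.take rn ++ m[rn] :: m.drop (rn + 1) := by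
    rw [List.getElem_cons_drop]
    exact (List.take_append_drop rn m).symm
  have hrow : m[rn] = m[rn].take cn ++ m[rn][cn] :: m[rn].drop (cn + 1) := by
    rw [List.getElem_cons_drop]
    exact (List.take_append_drop cn m[rn]).symm
  conv_rhs => rw [hm]
  simp only [count_pichus, List.map_append, List.map_cons, List.sum_append, List.sum_cons,
    PySem.List.count_eq]
  conv_rhs => rw [hrow]
  rw [hdot]
  simp [List.count_append]
  ring

lemma succ_maplen {m s : List (List String)} (h : s ∈ successors m) :
    s.map List.length = m.map List.length := by
  obtain ⟨rn, cn, h1, h2, hdot, hC, rfl⟩ := successors_struct h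
  have hm : m = m.take rn ++ m[rn] :: m.drop (rn + 1) := by
    rw [List.getElem_cons_drop]
    exact (List.take_append_drop rn m).symm
  conv_rhs => rw [hm]
  simp only [List.map_append, List.map_cons, List.append_assoc, List.singleton_append]
  have hL : (List.take cn m[rn] ++ "p" :: List.drop (cn + 1) m[rn]).length = m[rn].length := by
    simp
    omega
  rw [hL]

lemma succ_len {m s : List (List String)} (h : s ∈ successors m) : s.length = m.length := by
  have := congrArg List.length (succ_maplen h)
  simpa using this

lemma succ_headlen {m s : List (List String)} (h : s ∈ successors m) :
    (s.head?.getD []).length = (m.head?.getD []).length := by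
  have hmap := congrArg List.head? (succ_maplen h)
  rw [List.head?_map, List.head?_map] at hmap
  cases hs : s.head? <;> cases hm2 : m.head? <;> rw [hs, hm2] at hmap <;> simp at hmap <;> simp [hmap]

lemma succ_rows_ge {m s : List (List String)} (h : s ∈ successors m)
    (hpre : ∀ row ∈ m, (m.head?.getD []).length ≤ row.length) :
    ∀ row ∈ s, (s.head?.getD []).length ≤ row.length := by
  intro row hrow
  rw [succ_headlen h]
  have hmem : row.length ∈ s.map List.length := List.mem_map_of_mem hrow
  rw [succ_maplen h] at hmem
  obtain ⟨row', hrow', heq⟩ := List.mem_map.mp hmem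
  rw [← heq]
  exact hpre row' hrow'

-- the invariant the search maintains: R, C are the original dimensions, n the pichu
-- count of the current map, and every row is at least C long (Pre_solve, preserved)
def InvGC (m : List (List String)) (R C n : Int) : Prop :=
  R = (m.length : Int) ∧ C = ((m.head?.getD []).length : Int) ∧ n = count_pichus m ∧
  ∀ row ∈ m, (m.head?.getD []).length ≤ row.length

lemma inv_succ {m s : List (List String)} {R C n : Int}
    (hInv : InvGC m R C n) (h : s ∈ successors m) : InvGC s R C (n + 1) := by
  obtain ⟨hR, hC, hn, hrows⟩ := hInv
  exact ⟨by rw [hR, succ_len h], by rw [hC, succ_headlen h], by rw [hn, succ_count h],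
    succ_rows_ge h hrows⟩

lemma firstGoal_of_counts (k x : Int) :
    ∀ (l : List (List (List String))), (∀ s ∈ l, count_pichus s = x) →
      firstGoal k l = if x == k then l.head? else none := by
  intro l
  induction l with
  | nil =>
    intro _
    cases hx : x == k <;> rfl
  | cons s rest ih =>
    intro hc
    rw [firstGoal, is_goal, hc s (by simp)]
    by_cases hx : (x == k) = true
    · rw [if_pos hx, if_pos hx]
      rfl
    · rw [if_neg hx, if_neg hx, ih (fun t ht => hc t (by simp [ht])), if_neg hx]

lemma pvDfs_unfold (F : Nat) (g : List (List String)) (R C n k : Int) :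
    pvDfs (F + 1) g R C n k =
      match (if n + 1 == k then (pvCands g R C).head? else none) with
      | some p => some (pvPlace g p.1 p.2)
      | none => pvTry F g R C (pvCands g R C).reverse n k := by
  rw [pvDfs.eq_def]

lemma pvTry_nil (F : Nat) (g : List (List String)) (R C n k : Int) :
    pvTry F g R C [] n k = none := by
  rw [pvTry.eq_def]

lemma pvTry_cons (F : Nat) (g : List (List String)) (R C : Int) (p : Int × Int)
    (rest : List (Int × Int)) (n k : Int) :
    pvTry F g R C (p :: rest) n k =
      match pvDfs F (pvPlace g p.1 p.2) R C (n + 1) k with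
      | some res => some res
      | none => pvTry F g R C rest n k := by
  rw [pvTry.eq_def]

lemma dfs_bridge (F : Nat) :
    ∀ (m : List (List String)) (R C n k : Int),
      2 * pichuDots m + 1 ≤ F → InvGC m R C n → pvDfs F m R C n k = dfsA m k := by
  induction F using Nat.strong_induction_on with
  | _ F IH =>
    intro m R C n k hF hInv
    obtain ⟨hR, hC, hn, hrows⟩ := hInv
    subst hR hC hn
    obtain ⟨F', rfl⟩ : ∃ F', F = F' + 1 := ⟨F - 1, by omega⟩
    have hsucc := successors_eq m
    have hcounts : ∀ s ∈ successors m, count_pichus s = count_pichus m + 1 :=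
      fun s hs => succ_count hs
    rw [pvDfs_unfold, dfsA_eq, firstGoal_of_counts k (count_pichus m + 1) (successors m) hcounts]
    have htry : ∀ l, (∀ p ∈ l, p ∈ pvCands m (m.length : Int) ((m.head?.getD []).length : Int)) →
        pvTry F' m (m.length : Int) ((m.head?.getD []).length : Int) l (count_pichus m) k =
          tryA (l.map (fun p => pvPlace m p.1 p.2)) k := by
      intro l
      induction l with
      | nil =>
        intro _
        rw [pvTry_nil, List.map_nil, tryA_nil]
      | cons p rest ihl =>
        intro hmem
        have hpc := hmem p (by simp)
        have hps : pvPlace m p.1 p.2 ∈ successors m := by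
          rw [hsucc]
          exact List.mem_map_of_mem hpc
        have hdots : pichuDots (pvPlace m p.1 p.2) < pichuDots m := succ_dots_lt hps
        rw [pvTry_cons, List.map_cons, tryA_cons]
        have hbr := IH F' (by omega) (pvPlace m p.1 p.2)
          (m.length : Int) ((m.head?.getD []).length : Int) (count_pichus m + 1) k
          (by omega) (inv_succ ⟨rfl, rfl, rfl, hrows⟩ hps)
        rw [hbr]
        cases dfsA (pvPlace m p.1 p.2) k with
        | none => exact ihl (fun q hq => hmem q (by simp [hq]))
        | some res => rfl
    by_cases hk : (count_pichus m + 1 == k) = true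
    · rw [if_pos hk, if_pos hk, hsucc, List.head?_map]
      cases hcd : (pvCands m (m.length : Int) ((m.head?.getD []).length : Int)).head? with
      | some p => rfl
      | none =>
        have hnil : pvCands m (m.length : Int) ((m.head?.getD []).length : Int) = [] :=
          List.head?_eq_none_iff.mp hcd
        rw [hnil]
        rw [List.map_nil, List.reverse_nil, List.reverse_nil, tryA_nil, pvTry_nil]
        simp
    · rw [if_neg hk, if_neg hk, hsucc]
      rw [htry ((pvCands m (m.length : Int) ((m.head?.getD []).length : Int)).reverse)
          (fun p hp => List.mem_reverse.mp hp)]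
      rw [List.map_reverse]

lemma solve_alt_unfold (m : List (List String)) (k : Int) :
    solve_alt m k =
      match pvDfs (2 * pichuDots m + 1) m (m.length : Int) ((m.head?.getD []).length : Int)
          (count_pichus m) k with
      | none => ([], false)
      | some found => (found, true) := by
  cases m with
  | nil => rfl
  | cons r t => rfl

-- ===== VERDICT (by name: the statement is the Claim_ definition above) =====
theorem solve_spec : Claim_equal_solve := by
  intro m k _hdom hpre
  show solve m k = solve_alt m k
  rw [solve_eq_dfsA, solve_alt_unfold]
  rw [dfs_bridge (2 * pichuDots m + 1) m (m.length : Int) ((m.head?.getD []).length : Int)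
      (count_pichus m) k le_rfl ⟨rfl, rfl, rfl, hpre⟩]
  cases dfsA m k <;> rfl
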